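-- pv_equiv track=rewrite | github.com/MarkpageBxl/AdventOfCode | 2023/05/part2.py | compute_interval_overlap
-- ===== SOURCE A (Python) =====
-- from typing import Optional
--
-- def rel_to_abs(rel_interval: Optional[tuple[int, int]]) -> Optional[tuple[int, int]]:
--     if not rel_interval:
--         return None
--     return (rel_interval[0], rel_interval[0] + rel_interval[1] - 1)
--
-- def abs_to_rel(abs_interval: Optional[tuple[int, int]]) -> Optional[tuple[int, int]]:
--     if not abs_interval:
--         return None
--     return (abs_interval[0], abs_interval[1] - abs_interval[0] + 1)
--
-- def compute_interval_overlap(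
--     rel1: tuple[int, int], rel2: tuple[int, int]
-- ) -> tuple[Optional[tuple[int, int]], list[tuple[int, int]]]:
--     overlap = None
--     non_overlap = []
--     d1, d2 = [rel_to_abs(x) for x in (rel1, rel2)]
--     if d1[1] < d2[0] or d2[1] < d1[0]:
--         # full disjunction
--         overlap = None
--         non_overlap = [d1]
--     elif d1[0] < d2[0] and d2[0] <= d1[1] <= d2[1]:
--         # partial overlap (left)
--         non_overlap.append((d1[0], d2[0] - 1))
--         overlap = (d2[0], d1[1])
--     elif d2[0] <= d1[0] <= d2[1] and d1[1] > d2[1]: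
--         # partial overlap (right)
--         overlap = (d1[0], d2[1])
--         non_overlap.append((d2[1] + 1, d1[1]))
--     elif d1[0] >= d2[0] and d2[1] <= d2[1]:
--         # d1 subset of d2
--         overlap = d1
--         non_overlap = []
--     elif d1[0] < d2[0] and d1[1] > d2[1]:
--         # d1 superset of d2
--         overlap = d2
--         non_overlap.append((d1[0], d2[0] - 1))
--         non_overlap.append((d2[1] + 1, d1[1]))
--     else:
--         assert False
--
--     non_overlap = [abs_to_rel(x) for x in non_overlap]
--     overlap = abs_to_rel(overlap)
--
--     return overlap, non_overlap
-- ===== SOURCE B (Python) =====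
-- def compute_interval_overlap(rel1, rel2):
--     a1, b1 = rel1[0], rel1[0] + rel1[1] - 1
--     a2, b2 = rel2[0], rel2[0] + rel2[1] - 1
--     if b1 < a2 or b2 < a1:
--         return None, [rel1]
--     lo, hi = max(a1, a2), min(b1, b2)
--     non_overlap = []
--     if a1 < a2:
--         non_overlap.append((a1, a2 - a1))
--     if b1 > b2:
--         non_overlap.append((b2 + 1, b1 - b2))
--     return (lo, hi - lo + 1), non_overlap
-- ===== Notes on version B (the rewrite author's own statement) =====
-- stated objective: simpler
-- what changed: Replaced the five-branch case enumeration over absolute endpoints by a single intersection formula (lo=max, hi=min) plus at most two subtraction pieces, converting back to relative form in closed arithmetic.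
import Mathlib
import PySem

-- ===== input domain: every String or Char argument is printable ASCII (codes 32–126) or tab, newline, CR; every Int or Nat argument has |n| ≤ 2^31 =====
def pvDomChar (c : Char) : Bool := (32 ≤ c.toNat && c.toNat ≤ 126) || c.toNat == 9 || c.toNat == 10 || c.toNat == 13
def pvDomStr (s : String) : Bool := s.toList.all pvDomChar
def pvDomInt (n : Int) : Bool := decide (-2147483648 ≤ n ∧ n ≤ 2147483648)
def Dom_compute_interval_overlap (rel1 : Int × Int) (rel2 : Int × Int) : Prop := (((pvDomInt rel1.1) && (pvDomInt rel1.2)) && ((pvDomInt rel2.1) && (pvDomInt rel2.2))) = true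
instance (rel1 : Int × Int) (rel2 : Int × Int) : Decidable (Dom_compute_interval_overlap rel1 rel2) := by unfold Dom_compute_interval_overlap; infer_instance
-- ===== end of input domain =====

-- B replaces A's five-branch case enumeration by one intersection formula (max/min) plus
-- left/right subtraction pieces, computed directly in relative form (objective: simpler).


-- ===== PORT A =====
-- rel_to_abs: the 'not rel_interval' branch never fires for a 2-tuple argument (always truthy)
def rel_to_abs (r : Int × Int) : Int × Int := (r.1, r.1 + r.2 - 1)

def abs_to_rel (a : Int × Int) : Int × Int := (a.1, a.2 - a.1 + 1)

def abs_to_rel? (a : Option (Int × Int)) : Option (Int × Int) :=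
  match a with
  | none => none
  | some p => some (abs_to_rel p)

def compute_interval_overlap (rel1 : Int × Int) (rel2 : Int × Int) : (Option (Int × Int)) × (List (Int × Int)) :=
  let d1 := rel_to_abs rel1
  let d2 := rel_to_abs rel2
  let ov_no : Option (Int × Int) × List (Int × Int) :=
    if d1.2 < d2.1 ∨ d2.2 < d1.1 then
      -- full disjunction
      (none, [d1])
    else if d1.1 < d2.1 ∧ (d2.1 ≤ d1.2 ∧ d1.2 ≤ d2.2) then
      -- partial overlap (left)
      (some (d2.1, d1.2), [(d1.1, d2.1 - 1)])
    else if (d2.1 ≤ d1.1 ∧ d1.1 ≤ d2.2) ∧ d1.2 > d2.2 then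
      -- partial overlap (right)
      (some (d1.1, d2.2), [(d2.2 + 1, d1.2)])
    else if d1.1 ≥ d2.1 ∧ d2.2 ≤ d2.2 then
      -- d1 subset of d2 (the second conjunct is A's verbatim tautology)
      (some d1, [])
    else if d1.1 < d2.1 ∧ d1.2 > d2.2 then
      -- d1 superset of d2
      (some d2, [(d1.1, d2.1 - 1), (d2.2 + 1, d1.2)])
    else
      -- Python: 'assert False' — provably unreachable for integer inputs
      (none, [])
  (abs_to_rel? ov_no.1, ov_no.2.map abs_to_rel)

-- ===== PORT B =====
def compute_interval_overlap_alt (rel1 : Int × Int) (rel2 : Int × Int) : (Option (Int × Int)) × (List (Int × Int)) :=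
  let a1 := rel1.1
  let b1 := rel1.1 + rel1.2 - 1
  let a2 := rel2.1
  let b2 := rel2.1 + rel2.2 - 1
  if b1 < a2 ∨ b2 < a1 then
    (none, [rel1])
  else
    let lo := max a1 a2
    let hi := min b1 b2
    let non_overlap :=
      (if a1 < a2 then [(a1, a2 - a1)] else []) ++
      (if b1 > b2 then [(b2 + 1, b1 - b2)] else [])
    (some (lo, hi - lo + 1), non_overlap)

-- ===== PRECONDITION & SPEC =====
def Spec_compute_interval_overlap (rel1 : Int × Int) (rel2 : Int × Int) (out : (Option (Int × Int)) × (List (Int × Int))) : Prop := out = compute_interval_overlap_alt rel1 rel2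
instance (rel1 : Int × Int) (rel2 : Int × Int) (out : (Option (Int × Int)) × (List (Int × Int))) : Decidable (Spec_compute_interval_overlap rel1 rel2 out) := by unfold Spec_compute_interval_overlap; infer_instance

-- ===== CLAIM (what is proved, stated in full; the proofs are below) =====
def Claim_equal_compute_interval_overlap : Prop := ∀ (rel1 : Int × Int) (rel2 : Int × Int), Dom_compute_interval_overlap rel1 rel2 → Spec_compute_interval_overlap rel1 rel2 (compute_interval_overlap rel1 rel2)

-- ===== LEMMAS AND PROOFS =====

-- ===== VERDICT (by name: the statement is the Claim_ definition above) =====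
theorem compute_interval_overlap_spec : Claim_equal_compute_interval_overlap := by
  intro ⟨x1, l1⟩ ⟨x2, l2⟩ _
  show _ = _
  simp only [compute_interval_overlap, compute_interval_overlap_alt, rel_to_abs, abs_to_rel,
    abs_to_rel?]
  split_ifs with h1 h2 h3 h4 h5 <;>
    simp_all [abs_to_rel, Prod.ext_iff, max_def, min_def, List.map] <;> omega
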